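-- pv_equiv track=rewrite | github.com/VisionOra/NewsVerifier---Agent | flipzen/src/agent/nodes/utils.py | combine_content
-- ===== SOURCE A (Python) =====
-- from typing import Dict, List, Any, Optional, Union
--
-- def combine_content(content_items: List[Dict[str, Any]]) -> str:
--     """Combine multiple content items into a single text.
--
--     Args:
--         content_items (List[Dict[str, Any]]): List of content items
--
--     Returns:
--         str: Combined text of all content items
--     """
--     combined_text = []
--
--     for i, item in enumerate(content_items):
--         # Extract content from either "content" or "text" field
--         content = item.get("content", item.get("text", ""))
--         title = item.get("title", f"Document {i+1}")
--         url = item.get("url", "")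
--         source = item.get("source", "Unknown Source")
--
--         # Add a separator between documents
--         if i > 0:
--             combined_text.append("\n" + "-"*50 + "\n")
--
--         # Add document header
--         header = f"DOCUMENT {i+1}: {title}\nSOURCE: {source}\nURL: {url}\n"
--         combined_text.append(header)
--
--         # Add the content
--         combined_text.append(content)
--
--     return "\n".join(combined_text)
-- ===== SOURCE B (Python) =====
-- _SEP = "\n\n" + "-" * 50 + "\n\n"
--
--
-- def _go(i, items):
--     item = items[0]
--     content = item.get("content", item.get("text", ""))
--     title = item.get("title", f"Document {i+1}")
--     url = item.get("url", "")
--     source = item.get("source", "Unknown Source")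
--     block = f"DOCUMENT {i+1}: {title}\nSOURCE: {source}\nURL: {url}\n\n{content}"
--     if len(items) == 1:
--         return block
--     return block + _SEP + _go(i + 1, items[1:])
--
--
-- def combine_content(content_items):
--     if not content_items:
--         return ""
--     return _go(0, content_items)
-- ===== Notes on version B (the rewrite author's own statement) =====
-- stated objective: alternative
-- what changed: B replaces A's loop that appends header/content/separator fragments to a list and joins them with "\n" by a structural recursion on the list that concatenates each self-contained document block and the expanded separator directly into the result string, with no list and no join.
import Mathlib
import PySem

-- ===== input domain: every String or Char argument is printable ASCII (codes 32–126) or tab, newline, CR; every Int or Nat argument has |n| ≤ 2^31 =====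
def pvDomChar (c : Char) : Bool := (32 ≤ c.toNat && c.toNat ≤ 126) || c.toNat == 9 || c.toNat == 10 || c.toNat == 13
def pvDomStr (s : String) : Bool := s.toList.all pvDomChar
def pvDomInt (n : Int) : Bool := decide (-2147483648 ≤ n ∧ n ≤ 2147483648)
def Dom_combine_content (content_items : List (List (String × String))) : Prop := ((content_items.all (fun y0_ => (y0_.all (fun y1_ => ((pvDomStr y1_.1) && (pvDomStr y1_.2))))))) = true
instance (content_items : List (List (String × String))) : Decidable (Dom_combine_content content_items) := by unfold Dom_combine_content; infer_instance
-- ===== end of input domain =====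

-- B replaces A's fragment-list-plus-join loop by a structural recursion that concatenates
-- each self-contained document block and the separator directly (objective: alternative).

-- ===== PORT A =====
-- "-"*50 is ported as the literal 50-dash string.
def combine_content (content_items : List (List (String × String))) : String :=
  let combined_text : List String :=
    (PySem.List.enumerate content_items 0).foldl
      (fun combined_text p =>
        let i : Int := p.1
        let item := PySem.Dict.mk p.2
        let content := item.getD "content" (item.getD "text" "")
        let title := item.getD "title" ("Document " ++ PySem.Int.toStr (i + 1))
        let url := item.getD "url" ""
        let source := item.getD "source" "Unknown Source"
        let combined_text :=
          if i > 0 then combined_text ++ ["\n" ++ "--------------------------------------------------" ++ "\n"]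
          else combined_text
        let header := "DOCUMENT " ++ PySem.Int.toStr (i + 1) ++ ": " ++ title ++ "\nSOURCE: " ++ source ++ "\nURL: " ++ url ++ "\n"
        let combined_text := combined_text ++ [header]
        combined_text ++ [content])
      []
  PySem.Str.join "\n" combined_text

-- ===== PORT B =====
-- Source B's _SEP
def pvSepB : String := "\n\n" ++ "--------------------------------------------------" ++ "\n\n"

-- Source B's _go: recursion on the list; _go is only called on nonempty lists, the [] branch
-- is the unreachable totality default.
def pvGo (i : Int) (items : List (List (String × String))) : String :=
  match items with
  | [] => ""
  | item :: rest =>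
    let d := PySem.Dict.mk item
    let content := d.getD "content" (d.getD "text" "")
    let title := d.getD "title" ("Document " ++ PySem.Int.toStr (i + 1))
    let url := d.getD "url" ""
    let source := d.getD "source" "Unknown Source"
    let block := "DOCUMENT " ++ PySem.Int.toStr (i + 1) ++ ": " ++ title ++ "\nSOURCE: " ++ source ++ "\nURL: " ++ url ++ "\n\n" ++ content
    match rest with
    | [] => block
    | _ :: _ => block ++ pvSepB ++ pvGo (i + 1) rest

def combine_content_alt (content_items : List (List (String × String))) : String :=
  match content_items with
  | [] => ""
  | _ => pvGo 0 content_items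

-- ===== PRECONDITION & SPEC =====
def Spec_combine_content (content_items : List (List (String × String))) (out : String) : Prop := out = combine_content_alt content_items
instance (content_items : List (List (String × String))) (out : String) : Decidable (Spec_combine_content content_items out) := by unfold Spec_combine_content; infer_instance

-- ===== CLAIM =====
def Claim_equal_combine_content : Prop := ∀ (content_items : List (List (String × String))), Dom_combine_content content_items → Spec_combine_content content_items (combine_content content_items)

-- ===== LEMMAS AND PROOFS =====

-- A's header and content values, extracted for the proofs.
def pvHeaderA (i : Int) (item : List (String × String)) : String :=
  let d := PySem.Dict.mk item
  "DOCUMENT " ++ PySem.Int.toStr (i + 1) ++ ": " ++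
    d.getD "title" ("Document " ++ PySem.Int.toStr (i + 1)) ++
    "\nSOURCE: " ++ d.getD "source" "Unknown Source" ++
    "\nURL: " ++ d.getD "url" "" ++ "\n"

def pvContentA (item : List (String × String)) : String :=
  (PySem.Dict.mk item).getD "content" ((PySem.Dict.mk item).getD "text" "")

def pvSepA : String := "\n" ++ "--------------------------------------------------" ++ "\n"

-- the pieces A appends for one enumerated item
def pvPiecesA (p : Int × List (String × String)) : List String :=
  (if p.1 > 0 then [pvSepA] else []) ++ [pvHeaderA p.1 p.2, pvContentA p.2]

theorem pvFoldA_eq_flatMap (l : List (Int × List (String × String))) (acc : List String) :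
    l.foldl
      (fun combined_text p =>
        let i : Int := p.1
        let item := PySem.Dict.mk p.2
        let content := item.getD "content" (item.getD "text" "")
        let title := item.getD "title" ("Document " ++ PySem.Int.toStr (i + 1))
        let url := item.getD "url" ""
        let source := item.getD "source" "Unknown Source"
        let combined_text :=
          if i > 0 then combined_text ++ ["\n" ++ "--------------------------------------------------" ++ "\n"]
          else combined_text
        let header := "DOCUMENT " ++ PySem.Int.toStr (i + 1) ++ ": " ++ title ++ "\nSOURCE: " ++ source ++ "\nURL: " ++ url ++ "\n"
        let combined_text := combined_text ++ [header]
        combined_text ++ [content]) acc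
    = acc ++ l.flatMap pvPiecesA := by
  induction l generalizing acc with
  | nil => simp
  | cons p ps ih =>
    simp only [List.foldl_cons, List.flatMap_cons, ih, pvPiecesA, pvHeaderA, pvContentA, pvSepA]
    split_ifs with h <;> simp

-- toList of B's block for one item, in terms of A's header and content
theorem pvGo_single (i : Int) (x : List (String × String)) :
    (pvGo i [x]).toList = (pvHeaderA i x).toList ++ '\n' :: (pvContentA x).toList := by
  simp [pvGo, pvHeaderA, pvContentA, String.toList_append]

-- main induction: joining A's fragment list with "\n" equals B's recursive concatenation
theorem pvJoin_key (xs : List (List (String × String))) :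
    ∀ (i : Int) (x : List (String × String)), 0 ≤ i →
    PySem.Chars.join ['\n']
      (List.map String.toList
        (pvHeaderA i x :: pvContentA x :: (PySem.List.enumerate xs (i + 1)).flatMap pvPiecesA))
    = (pvGo i (x :: xs)).toList := by
  induction xs with
  | nil =>
    intro i x _
    simp only [PySem.List.enumerate_nil, List.flatMap_nil, List.map_cons, List.map_nil,
      PySem.Chars.join_cons_cons, PySem.Chars.join_singleton]
    rw [pvGo_single]
    simp
  | cons y ys ih =>
    intro i x hi
    have hpos : (i + 1 : Int) > 0 := by omega
    have ih' := ih (i + 1) y (by omega)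
    simp only [PySem.List.enumerate_cons, List.flatMap_cons, pvPiecesA,
      if_pos hpos, List.cons_append, List.nil_append, List.map_cons,
      PySem.Chars.join_cons_cons] at *
    rw [ih']
    show _ = (pvGo i (x :: y :: ys)).toList
    simp only [pvGo, pvHeaderA, pvContentA, pvSepA, pvSepB, String.toList_append]
    simp [PySem.Dict.getD]

-- ===== VERDICT =====
theorem combine_content_spec : Claim_equal_combine_content := by
  intro content_items _
  unfold Spec_combine_content combine_content combine_content_alt
  rw [pvFoldA_eq_flatMap]
  cases content_items with
  | nil => simp [PySem.Str.join]
  | cons x xs =>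
    simp only [PySem.List.enumerate_cons, List.flatMap_cons, List.nil_append, pvPiecesA]
    have h0 : ¬ ((0 : Int) > 0) := by omega
    simp only [if_neg h0, List.nil_append, PySem.Str.join]
    apply String.toList_inj.mp
    simp only [String.toList_ofList]
    have := pvJoin_key xs 0 x (by omega)
    simpa using this
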